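-- pv_equiv track=rewrite | github.com/lisj1211/Algorithm | 剑指offer/13. 机器人的运动范围.py | not_go
-- ===== SOURCE A (Python) =====
-- def not_go(i, j, k):
--     res = 0
--     while i:
--         res += i%10
--         i //= 10
--     while j:
--         res += j%10
--         j //= 10
--     return res > k
-- ===== SOURCE B (Python) =====
-- def not_go(i, j, k):
--     return sum(int(c) for c in str(i)) + sum(int(c) for c in str(j)) > k
-- ===== Notes on version B (the rewrite author's own statement) =====
-- stated objective: idiomatic
-- what changed: Replaces the two accumulate-in-loop %10 // 10 while-loops with a single return expression summing the digit characters of str(i) and str(j).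
import Mathlib
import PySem

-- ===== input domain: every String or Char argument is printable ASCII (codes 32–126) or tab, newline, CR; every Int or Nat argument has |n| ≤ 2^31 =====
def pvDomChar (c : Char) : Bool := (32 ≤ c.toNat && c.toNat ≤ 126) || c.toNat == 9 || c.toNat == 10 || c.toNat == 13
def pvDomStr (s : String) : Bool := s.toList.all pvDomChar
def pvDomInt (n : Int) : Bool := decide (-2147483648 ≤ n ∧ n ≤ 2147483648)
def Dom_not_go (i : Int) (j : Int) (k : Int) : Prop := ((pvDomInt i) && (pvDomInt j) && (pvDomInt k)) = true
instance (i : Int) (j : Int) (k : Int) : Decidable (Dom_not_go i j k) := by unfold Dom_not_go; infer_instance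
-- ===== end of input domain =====

-- B replaces A's two %10-//10 while-loops by a single expression summing the digit
-- characters of str(i) and str(j) (idiomatic; same cost).

-- ===== PORT A =====
-- Python: `while i: res += i % 10; i //= 10`.  The Python loop condition is i ≠ 0, but for
-- i < 0 floor-division drives i to -1 and the loop never terminates (Pre_ excludes those
-- inputs); the `0 < i` guard only totalizes the same computation.
def pvLoopA (i : Int) (res : Int) : Int :=
  if h : 0 < i then pvLoopA (PySem.Int.floordiv i 10) (res + PySem.Int.mod i 10) else res
termination_by i.toNat
decreasing_by
  simp only [PySem.Int.floordiv]
  rw [Int.fdiv_eq_ediv]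
  omega

def not_go (i : Int) (j : Int) (k : Int) : Bool :=
  decide (pvLoopA j (pvLoopA i 0) > k)

-- ===== PORT B =====
-- int(c) for one character c; PySem.Int.ofChars? is exact (none = ValueError, which Pre_ excludes).
def pvDigitInt (c : Char) : Int := (PySem.Int.ofChars? [c]).getD 0

def not_go_alt (i : Int) (j : Int) (k : Int) : Bool :=
  decide (((PySem.Int.toStr i).toList.map pvDigitInt).sum
        + ((PySem.Int.toStr j).toList.map pvDigitInt).sum > k)

-- ===== PRECONDITION & SPEC =====
-- Pre_ excludes i < 0 or j < 0: there A's while-loop never terminates (i //= 10 stalls at -1),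
-- so A returns on exactly the inputs Pre_ admits.
def Pre_not_go (i : Int) (j : Int) (k : Int) : Prop := 0 ≤ i ∧ 0 ≤ j
instance (i : Int) (j : Int) (k : Int) : Decidable (Pre_not_go i j k) := by unfold Pre_not_go; infer_instance
def pvWitness_not_go : Int × Int × Int := (19, 3, 5)

def Spec_not_go (i : Int) (j : Int) (k : Int) (out : Bool) : Prop := out = not_go_alt i j k
instance (i : Int) (j : Int) (k : Int) (out : Bool) : Decidable (Spec_not_go i j k out) := by unfold Spec_not_go; infer_instance

-- ===== CLAIM (what is proved, stated in full; the proofs are below) =====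
def Claim_equal_not_go : Prop := ∀ (i : Int) (j : Int) (k : Int), Dom_not_go i j k → Pre_not_go i j k → Spec_not_go i j k (not_go i j k)

-- ===== LEMMAS AND PROOFS =====

lemma pvDigitInt_digitChar (d : Nat) (hd : d < 10) :
    pvDigitInt (Nat.digitChar d) = (d : Int) := by
  interval_cases d <;> decide

-- A's loop on a natural number equals res + the digit-character sum of Nat.toDigits 10 n.
lemma pvLoopA_eq (n : Nat) (res : Int) :
    pvLoopA (n : Int) res = res + ((Nat.toDigits 10 n).map pvDigitInt).sum := by
  induction n using Nat.strong_induction_on generalizing res with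
  | _ n ih =>
    rcases Nat.eq_zero_or_pos n with h0 | hpos
    · subst h0
      rw [pvLoopA]
      norm_num [Nat.toDigits_zero]
      decide
    · rw [pvLoopA]
      have hgt : (0 : Int) < (n : Int) := by exact_mod_cast hpos
      rw [dif_pos hgt]
      have hfd : PySem.Int.floordiv (n : Int) 10 = ((n / 10 : Nat) : Int) := by
        simp only [PySem.Int.floordiv]
        rw [Int.fdiv_eq_ediv]
        omega
      have hmd : PySem.Int.mod (n : Int) 10 = ((n % 10 : Nat) : Int) := by
        simp only [PySem.Int.mod]
        rw [Int.fmod_eq_emod]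
        norm_num
      rw [hfd, hmd]
      rcases Nat.lt_or_ge n 10 with hsmall | hbig
      · have : n / 10 = 0 := Nat.div_eq_of_lt hsmall
        rw [this]
        rw [pvLoopA]
        norm_num [Nat.toDigits_of_lt_base hsmall, Nat.mod_eq_of_lt hsmall,
          pvDigitInt_digitChar n hsmall]
      · have hdiv : n / 10 < n := Nat.div_lt_self hpos (by norm_num)
        rw [ih (n / 10) hdiv]
        rw [Nat.toDigits_of_base_le (by norm_num) hbig]
        rw [List.map_append, List.sum_append]
        simp [pvDigitInt_digitChar (n % 10) (Nat.mod_lt n (by norm_num))]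
        ring

-- For 0 ≤ m, B's per-argument digit sum equals A's loop started at 0.
lemma sum_toStr_eq (m : Int) (hm : 0 ≤ m) (res : Int) :
    pvLoopA m res = res + ((PySem.Int.toStr m).toList.map pvDigitInt).sum := by
  rw [PySem.Int.toList_toStr]
  obtain ⟨n, rfl⟩ := Int.eq_ofNat_of_zero_le hm
  rw [pvLoopA_eq]
  simp only [PySem.Int.toChars]
  rw [if_neg (by omega)]
  norm_num

-- ===== VERDICT (by name: the statement is the Claim_ definition above) =====
theorem not_go_spec : Claim_equal_not_go := by
  intro i j k _ hpre
  unfold Spec_not_go not_go not_go_alt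
  rw [sum_toStr_eq i hpre.1 0, sum_toStr_eq j hpre.2 _]
  norm_num [add_comm]
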